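-- pv_equiv track=rewrite | github.com/thebrid/advent | 2015/05/test_nice_strings.py | is_string_nice
-- ===== SOURCE A (Python) =====
-- BANNED_STRINGS = {"ab", "cd", "pq", "xy"}
--
-- VOWELS = {"a", "e", "i", "o", "u"}
--
-- def is_string_nice(s: str) -> bool:
--     last_char = None
--     contains_repeat = False
--     vowel_count = 0
--     contains_banned_string = False
--
--     for char in s:
--         contains_repeat |= char == last_char
--
--         if char in VOWELS:
--             vowel_count += 1
--
--         if last_char is not None and f"{last_char}{char}" in BANNED_STRINGS:
--             contains_banned_string = True
--             break
--
--         last_char = char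
--
--     return vowel_count >= 3 and contains_repeat and not contains_banned_string
-- ===== SOURCE B (Python) =====
-- VOWELS = {"a", "e", "i", "o", "u"}
--
-- BANNED_PAIRS = {("a", "b"), ("c", "d"), ("p", "q"), ("x", "y")}
--
-- def is_string_nice(s: str) -> bool:
--     pairs = list(zip(s, s[1:]))
--     vowel_count = sum(1 for ch in s if ch in VOWELS)
--     has_repeat = any(a == b for a, b in pairs)
--     has_banned = any(p in BANNED_PAIRS for p in pairs)
--     return vowel_count >= 3 and has_repeat and not has_banned
-- ===== Notes on version B (the rewrite author's own statement) =====
-- stated objective: simpler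
-- what changed: Replaced the single stateful loop (last_char tracking, early break) by three independent passes: a vowel count over the characters and two any() scans over the zipped adjacent pairs; the dropped early break is unobservable because a banned pair forces the result False.
import Mathlib
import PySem

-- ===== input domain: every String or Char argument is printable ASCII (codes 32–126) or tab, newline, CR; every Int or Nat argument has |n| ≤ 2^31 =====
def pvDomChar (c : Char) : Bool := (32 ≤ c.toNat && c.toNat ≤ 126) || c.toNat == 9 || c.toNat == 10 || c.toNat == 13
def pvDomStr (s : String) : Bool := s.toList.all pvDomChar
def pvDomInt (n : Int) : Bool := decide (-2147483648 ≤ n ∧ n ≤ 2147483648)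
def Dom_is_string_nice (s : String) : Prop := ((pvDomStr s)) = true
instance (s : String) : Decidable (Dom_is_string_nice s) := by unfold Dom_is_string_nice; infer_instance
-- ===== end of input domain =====

-- B replaces A's single stateful loop (last_char, early break) by three independent
-- passes: a vowel count and two any() scans over zipped adjacent pairs (objective: simpler).

-- ===== PORT A =====
-- char in VOWELS
def isVowelA (c : Char) : Bool := c == 'a' || c == 'e' || c == 'i' || c == 'o' || c == 'u'
-- f"{last_char}{char}" in BANNED_STRINGS
def bannedPairA (a c : Char) : Bool :=
  (a == 'a' && c == 'b') || (a == 'c' && c == 'd') || (a == 'p' && c == 'q') || (a == 'x' && c == 'y')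

-- the for-loop with its early break; state = (last_char, contains_repeat, vowel_count, contains_banned_string)
def loopA : List Char → Option Char → Bool → Int → Bool × Int × Bool
  | [], _, rep, vc => (rep, vc, false)
  | c :: t, last, rep, vc =>
    let rep := rep || (match last with | some a => a == c | none => false)
    let vc := if isVowelA c then vc + 1 else vc
    match last with
    | some a => if bannedPairA a c then (rep, vc, true) else loopA t (some c) rep vc
    | none => loopA t (some c) rep vc

def is_string_nice (s : String) : Bool :=
  let r := loopA s.toList none false 0
  decide (r.2.1 ≥ 3) && r.1 && !r.2.2

-- ===== PORT B =====
def isVowelB (c : Char) : Bool := c == 'a' || c == 'e' || c == 'i' || c == 'o' || c == 'u'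
-- p in BANNED_PAIRS
def bannedPB (p : Char × Char) : Bool :=
  (p.1 == 'a' && p.2 == 'b') || (p.1 == 'c' && p.2 == 'd') ||
  (p.1 == 'p' && p.2 == 'q') || (p.1 == 'x' && p.2 == 'y')

def is_string_nice_alt (s : String) : Bool :=
  let l := s.toList
  let pairs := l.zip l.tail
  let vowelCount : Int := ((l.filter isVowelB).length : Int)
  let hasRepeat := pairs.any (fun p => p.1 == p.2)
  let hasBanned := pairs.any bannedPB
  decide (vowelCount ≥ 3) && hasRepeat && !hasBanned

-- ===== PRECONDITION & SPEC =====
def Spec_is_string_nice (s : String) (out : Bool) : Prop := out = is_string_nice_alt s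
instance (s : String) (out : Bool) : Decidable (Spec_is_string_nice s out) := by unfold Spec_is_string_nice; infer_instance

-- ===== CLAIM (what is proved, stated in full; the proofs are below) =====
def Claim_equal_is_string_nice : Prop := ∀ (s : String), Dom_is_string_nice s → Spec_is_string_nice s (is_string_nice s)

-- ===== LEMMAS AND PROOFS =====

-- bannedPB on a pair is bannedPairA on its components
theorem bannedPB_pair (a c : Char) : bannedPB (a, c) = bannedPairA a c := rfl

-- the third (banned) component of A's loop is existence of a banned adjacent pair
theorem loopA_banned (l : List Char) : ∀ (a : Char) (rep : Bool) (vc : Int),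
    (loopA l (some a) rep vc).2.2 = ((a :: l).zip l).any bannedPB := by
  induction l with
  | nil => intro a rep vc; simp [loopA]
  | cons c t ih =>
    intro a rep vc
    simp only [loopA, List.zip_cons_cons, List.any_cons, bannedPB_pair]
    by_cases h : bannedPairA a c = true
    · simp [h]
    · simp only [Bool.not_eq_true] at h
      simp [h, ih]

-- when no banned pair exists, A's loop computes the or of repeats and the vowel count
theorem loopA_noBanned (l : List Char) : ∀ (a : Char) (rep : Bool) (vc : Int),
    ((a :: l).zip l).any bannedPB = false →
    loopA l (some a) rep vc =
      (rep || ((a :: l).zip l).any (fun p => p.1 == p.2),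
       vc + ((l.filter isVowelB).length : Int), false) := by
  induction l with
  | nil => intro a rep vc _; simp [loopA]
  | cons c t ih =>
    intro a rep vc hb
    rw [List.zip_cons_cons, List.any_cons, Bool.or_eq_false_iff] at hb
    obtain ⟨hb1, hb2⟩ := hb
    rw [bannedPB_pair] at hb1
    simp only [loopA, hb1, Bool.false_eq_true, if_false]
    rw [ih c _ _ hb2]
    have hvv : isVowelB c = isVowelA c := rfl
    refine Prod.ext ?_ (Prod.ext ?_ rfl)
    · simp [List.zip_cons_cons, Bool.or_assoc]
    · simp only [List.filter_cons, hvv]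
      by_cases hv : isVowelA c = true
      · simp [hv]; ring
      · simp only [Bool.not_eq_true] at hv
        simp [hv]

-- ===== VERDICT (by name: the statement is the Claim_ definition above) =====
theorem is_string_nice_spec : Claim_equal_is_string_nice := by
  intro s _
  unfold Spec_is_string_nice is_string_nice is_string_nice_alt
  cases hl : s.toList with
  | nil => simp [loopA]
  | cons c t =>
    simp only [List.tail_cons]
    by_cases hb : ((c :: t).zip t).any bannedPB = true
    · have hB : (loopA (c :: t) none false 0).2.2 = true := by
        simp only [loopA]
        rw [loopA_banned]; exact hb
      simp [hB, hb]
    · simp only [Bool.not_eq_true] at hb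
      have hstep : loopA (c :: t) none false 0 =
          loopA t (some c) (false || false) (if isVowelA c = true then (0:Int) + 1 else 0) := by
        simp [loopA]
      rw [hstep, loopA_noBanned t c _ _ hb]
      have hvv : isVowelB c = isVowelA c := rfl
      simp [hb]
      by_cases hv : isVowelA c = true <;>
        simp only [hv, List.filter_cons, hvv, if_true, Bool.false_eq_true, if_false, List.length_cons] <;>
        congr 1 <;> simp only [decide_eq_decide] <;> push_cast <;> omega
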